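-- pv_equiv track=rewrite | github.com/katerina2121/algs | lb_2/src/little_algorithm.py | format_route
-- ===== SOURCE A (Python) =====
-- def format_route(route, n):
--     if not route:
--         return []
--
--     route_map = {}
--     for u, v in route:
--         route_map[u] = v
--
--     # Начинаем с города 0
--     current = 0
--     ordered_route = [current]
--
--     # Строим маршрут по цепочке
--     while len(ordered_route) < n:
--         current = route_map.get(current)
--         if current is None:
--             break
--         ordered_route.append(current)
--
--     return ordered_route
-- ===== SOURCE B (Python) =====
-- def format_route(route, n):
--     # Cycle-detecting walk: record the first index of every visited city; as soon
--     # as the next city was already visited, the rest of the output is the cycle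
--     # slice repeated, produced arithmetically (divmod) instead of step-by-step.
--     if not route:
--         return []
--     succ = {}
--     for u, v in route:
--         succ[u] = v
--     path = [0]
--     pos = {0: 0}
--     cur = 0
--     while len(path) < n:
--         nxt = succ.get(cur)
--         if nxt is None:
--             return path
--         start = pos.get(nxt)
--         if start is not None:
--             cycle = path[start:]
--             need = n - len(path)
--             reps, rem = divmod(need, len(cycle))
--             return path + cycle * reps + cycle[:rem]
--         pos[nxt] = len(path)
--         path.append(nxt)
--         cur = nxt
--     return path
-- ===== Notes on version B (the rewrite author's own statement) =====
-- stated objective: alternative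
-- what changed: B replaces A's step-by-step chain walk (one dict lookup per output element) with a cycle-detecting walk: it records the first index of each visited city, and once the next city repeats it emits the remaining output arithmetically as the cycle slice repeated reps times plus a prefix (divmod), doing no further lookups.
import Mathlib
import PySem

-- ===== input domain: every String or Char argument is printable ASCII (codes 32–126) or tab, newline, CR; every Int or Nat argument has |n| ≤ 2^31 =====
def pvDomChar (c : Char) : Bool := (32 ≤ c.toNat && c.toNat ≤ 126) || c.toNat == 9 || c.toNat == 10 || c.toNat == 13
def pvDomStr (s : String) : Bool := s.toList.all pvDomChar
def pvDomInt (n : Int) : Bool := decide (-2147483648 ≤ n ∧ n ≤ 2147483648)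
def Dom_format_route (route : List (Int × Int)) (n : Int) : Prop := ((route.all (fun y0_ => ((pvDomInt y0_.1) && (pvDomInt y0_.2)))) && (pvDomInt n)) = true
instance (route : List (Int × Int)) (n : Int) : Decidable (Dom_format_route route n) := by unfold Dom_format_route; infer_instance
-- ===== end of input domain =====

-- B replaces A's step-by-step successor walk with a cycle-detecting walk that, once a
-- city repeats, emits the rest of the output arithmetically as a repeated cycle slice
-- (objective: alternative; same return value).

-- ===== PORT A =====
-- while len(ordered_route) < n: length starts at 1 and grows by exactly 1 per iteration,
-- so the loop runs at most (n-1).toNat times; fuel counts exactly those iterations.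
def aLoop (m : PySem.Dict Int Int) : Nat → Int → List Int → List Int
  | 0, _, acc => acc
  | fuel+1, cur, acc =>
    match m.get? cur with
    | none => acc
    | some v => aLoop m fuel v (acc ++ [v])

def format_route (route : List (Int × Int)) (n : Int) : List Int :=
  if route = [] then []
  else
    let route_map := route.foldl (fun d p => d.insert p.1 p.2) PySem.Dict.empty
    aLoop route_map (n - 1).toNat 0 [0]

-- ===== PORT B =====
-- cycle * reps + cycle[:rem]  with  reps, rem = divmod(need, len(cycle))
def cycleRepeat (cycle : List Int) (need : Nat) : List Int :=
  (List.replicate (need / cycle.length) cycle).flatten ++ cycle.take (need % cycle.length)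

-- the while loop of Source B; fuel = n - len(path) at entry, decreasing by 1 per append
def bLoop (succ : PySem.Dict Int Int) : Nat → List Int → PySem.Dict Int Int → Int → List Int
  | 0, path, _, _ => path
  | fuel+1, path, pos, cur =>
    match succ.get? cur with
    | none => path
    | some v =>
      match pos.get? v with
      | some start => path ++ cycleRepeat (path.drop start.toNat) (fuel+1)
      | none => bLoop succ fuel (path ++ [v]) (pos.insert v (path.length : Int)) v

def format_route_alt (route : List (Int × Int)) (n : Int) : List Int :=
  if route = [] then []
  else
    let succ := route.foldl (fun d p => d.insert p.1 p.2) PySem.Dict.empty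
    bLoop succ (n - 1).toNat [0] (PySem.Dict.empty.insert 0 0) 0

-- ===== PRECONDITION & SPEC =====
def Spec_format_route (route : List (Int × Int)) (n : Int) (out : List Int) : Prop := out = format_route_alt route n
instance (route : List (Int × Int)) (n : Int) (out : List Int) : Decidable (Spec_format_route route n out) := by unfold Spec_format_route; infer_instance

-- ===== CLAIM (what is proved, stated in full; the proofs are below) =====
def Claim_equal_format_route : Prop := ∀ (route : List (Int × Int)) (n : Int), Dom_format_route route n → Spec_format_route route n (format_route route n)

-- ===== LEMMAS AND PROOFS =====

-- the first `fuel` elements of the infinite repetition of c, starting at index k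
def cycTake (c : List Int) : Nat → Nat → List Int
  | 0, _ => []
  | fuel+1, k => c.getD (k % c.length) 0 :: cycTake c fuel (k+1)

-- loop invariant of Source B: path is a successor chain from 0, pos indexes its elements
def ChainInv (succ : PySem.Dict Int Int) (path : List Int) (pos : PySem.Dict Int Int) : Prop :=
  path ≠ [] ∧
  (∀ i : Nat, i + 1 < path.length → succ.get? (path.getD i 0) = some (path.getD (i+1) 0)) ∧
  (∀ c j, pos.get? c = some j → ∃ jn : Nat, j = (jn : Int) ∧ jn < path.length ∧ path.getD jn 0 = c) ∧
  (∀ c, pos.get? c = none → c ∉ path)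

theorem cycTake_shift (c : List Int) (fuel : Nat) : ∀ k, cycTake c fuel (k + c.length) = cycTake c fuel k := by
  induction fuel with
  | zero => intro k; rfl
  | succ fuel ih =>
    intro k
    simp only [cycTake, Nat.add_mod_right]
    rw [show k + c.length + 1 = (k+1) + c.length by omega, ih]

theorem cycTake_small (c : List Int) : ∀ (a k : Nat), k + a ≤ c.length → cycTake c a k = (c.drop k).take a := by
  intro a
  induction a with
  | zero => intro k _; simp [cycTake]
  | succ a ih =>
    intro k hk
    have hklt : k < c.length := by omega
    rw [cycTake, Nat.mod_eq_of_lt hklt, List.drop_eq_getElem_cons hklt, List.take_succ_cons,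
      ih (k+1) (by omega), List.getD_eq_getElem c 0 hklt]

theorem cycTake_add (c : List Int) : ∀ (a b k : Nat), cycTake c (a + b) k = cycTake c a k ++ cycTake c b (k + a) := by
  intro a
  induction a with
  | zero => intro b k; simp [cycTake]
  | succ a ih =>
    intro b k
    rw [show a + 1 + b = (a + b) + 1 by omega]
    simp only [cycTake]
    rw [ih b (k+1), show k + 1 + a = k + (a + 1) by omega]
    simp [List.cons_append]

theorem cycTake_repeat (c : List Int) (_hc : c ≠ []) : ∀ (q r : Nat), r < c.length →
    cycTake c (q * c.length + r) 0 = (List.replicate q c).flatten ++ c.take r := by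
  intro q
  induction q with
  | zero => intro r hr; simpa using cycTake_small c r 0 (by omega)
  | succ q ih =>
    intro r hr
    have h1 : (q+1) * c.length + r = c.length + (q * c.length + r) := by ring
    rw [h1, cycTake_add c c.length (q * c.length + r) 0, cycTake_shift c _ 0, ih r hr,
      cycTake_small c c.length 0 (by omega)]
    simp [List.replicate_succ]

theorem cycleRepeat_eq (c : List Int) (hc : c ≠ []) (need : Nat) :
    cycleRepeat c need = cycTake c need 0 := by
  have hlen : 0 < c.length := List.length_pos_of_ne_nil hc
  have hmod : need % c.length < c.length := Nat.mod_lt _ hlen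
  have hdm : need / c.length * c.length + need % c.length = need := by
    rw [Nat.mul_comm]; exact Nat.div_add_mod ..
  rw [cycleRepeat, ← cycTake_repeat c hc _ _ hmod, hdm]

theorem aLoop_cyc (succ : PySem.Dict Int Int) (c : List Int) (hc : c ≠ [])
    (hcyc : ∀ i : Nat, i < c.length → succ.get? (c.getD i 0) = some (c.getD ((i+1) % c.length) 0)) :
    ∀ (fuel : Nat) (k : Nat) (acc : List Int),
      aLoop succ fuel (c.getD (k % c.length) 0) acc = acc ++ cycTake c fuel (k+1) := by
  intro fuel
  have hlen : 0 < c.length := List.length_pos_of_ne_nil hc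
  induction fuel with
  | zero => intro k acc; simp [aLoop, cycTake]
  | succ fuel ih =>
    intro k acc
    have hmod : k % c.length < c.length := Nat.mod_lt _ hlen
    have hstep := hcyc (k % c.length) hmod
    have hidx : (k % c.length + 1) % c.length = (k + 1) % c.length := by
      conv_rhs => rw [Nat.add_mod]
      rw [Nat.add_mod (k % c.length) 1, Nat.mod_mod_of_dvd]
      exact dvd_refl _
    rw [hidx] at hstep
    simp only [aLoop, hstep]
    rw [ih (k+1) (acc ++ [c.getD ((k+1) % c.length) 0])]
    simp [cycTake]

theorem getD_drop (l : List Int) (i j : Nat) : (l.drop i).getD j 0 = l.getD (i + j) 0 := by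
  simp [List.getD, List.getElem?_drop]

theorem bLoop_eq_aLoop (succ : PySem.Dict Int Int) :
    ∀ (fuel : Nat) (path : List Int) (pos : PySem.Dict Int Int) (cur : Int),
      ChainInv succ path pos → cur = path.getD (path.length - 1) 0 →
      bLoop succ fuel path pos cur = aLoop succ fuel cur path := by
  intro fuel
  induction fuel with
  | zero => intro path pos cur _ _; rfl
  | succ fuel ih =>
    intro path pos cur hinv hcur
    obtain ⟨hne, hchain, hsome, hnone⟩ := hinv
    have hlen : 0 < path.length := List.length_pos_of_ne_nil hne
    cases hv : succ.get? cur with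
    | none => simp [bLoop, aLoop, hv]
    | some v =>
      have hred : bLoop succ (fuel+1) path pos cur =
          (match pos.get? v with
           | some start => path ++ cycleRepeat (path.drop start.toNat) (fuel+1)
           | none => bLoop succ fuel (path ++ [v]) (pos.insert v (path.length : Int)) v) := by
        simp [bLoop, hv]
      have hared : aLoop succ (fuel+1) cur path = aLoop succ fuel v (path ++ [v]) := by
        simp [aLoop, hv]
      rw [hred]
      cases hp : pos.get? v with
      | some start =>
        -- cycle case
        obtain ⟨jn, hj, hjlt, hjv⟩ := hsome v start hp
        set c := path.drop jn with hc
        have hstart : start.toNat = jn := by rw [hj]; exact Int.toNat_natCast jn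
        have hclen : c.length = path.length - jn := by simp [hc]
        have hcne : c ≠ [] := by
          intro hnil; have := congrArg List.length hnil; simp [hclen] at this; omega
        have hclen0 : 0 < c.length := List.length_pos_of_ne_nil hcne
        have hcget : ∀ i : Nat, c.getD i 0 = path.getD (jn + i) 0 := fun i => getD_drop path jn i
        -- cur is the last element of c
        have hcur' : cur = c.getD (c.length - 1) 0 := by
          rw [hcget, hclen, hcur]; congr 1; omega
        -- cyclic successor property
        have hcyc : ∀ i : Nat, i < c.length → succ.get? (c.getD i 0) = some (c.getD ((i+1) % c.length) 0) := by
          intro i hi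
          by_cases hlast : i + 1 < c.length
          · have : (i+1) % c.length = i + 1 := Nat.mod_eq_of_lt hlast
            rw [this, hcget, hcget, show jn + (i+1) = (jn + i) + 1 by omega]
            exact hchain (jn + i) (by omega)
          · have hieq : i = c.length - 1 := by omega
            have h0 : (i+1) % c.length = 0 := by
              have h1 : i + 1 = c.length := by omega
              simp [h1]
            rw [h0, hcget, hcget, Nat.add_zero, hjv,
              show jn + i = path.length - 1 by omega, ← hcur]
            exact hv
        have hper := aLoop_cyc succ c hcne hcyc (fuel+1) (c.length - 1) path
        rw [Nat.mod_eq_of_lt (by omega), ← hcur',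
          show c.length - 1 + 1 = c.length by omega] at hper
        have hshift : cycTake c (fuel+1) c.length = cycTake c (fuel+1) 0 := by
          have h := cycTake_shift c (fuel+1) 0
          simpa using h
        show path ++ cycleRepeat (List.drop start.toNat path) (fuel + 1) = aLoop succ (fuel + 1) cur path
        rw [hstart, ← hc, cycleRepeat_eq c hcne, ← hshift, ← hper]
      | none =>
        -- append case
        have hvnotmem : v ∉ path := hnone v hp
        have hlast : path.getD (path.length - 1) 0 = cur := hcur.symm
        have hinv' : ChainInv succ (path ++ [v]) (pos.insert v (path.length : Int)) := by
          refine ⟨by simp, ?_, ?_, ?_⟩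
          · intro i hi
            simp only [List.length_append, List.length_cons, List.length_nil] at hi
            by_cases h2 : i + 1 < path.length
            · rw [List.getD_append _ _ _ _ (by omega), List.getD_append _ _ _ _ h2]
              exact hchain i h2
            · have hieq : i = path.length - 1 := by omega
              rw [List.getD_append _ _ _ _ (by omega), hieq, hlast,
                show path.length - 1 + 1 = path.length by omega]
              simp [hv]
          · intro c j hj
            rw [PySem.Dict.get?_insert] at hj
            by_cases hcv : c = v
            · subst hcv
              simp at hj
              exact ⟨path.length, by omega, by simp, by simp⟩
            · rw [if_neg hcv] at hj
              obtain ⟨jn, h1, h2, h3⟩ := hsome c j hj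
              exact ⟨jn, h1, by simp; omega, by rw [List.getD_append _ _ _ _ h2]; exact h3⟩
          · intro c hcnone
            rw [PySem.Dict.get?_insert] at hcnone
            by_cases hcv : c = v
            · simp [hcv] at hcnone
            · rw [if_neg hcv] at hcnone
              have := hnone c hcnone
              simp [hcv, this]
        have hcur' : v = (path ++ [v]).getD ((path ++ [v]).length - 1) 0 := by
          simp
        show bLoop succ fuel (path ++ [v]) (pos.insert v (path.length : Int)) v = aLoop succ (fuel + 1) cur path
        rw [hared]
        exact ih (path ++ [v]) (pos.insert v (path.length : Int)) v hinv' hcur'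

-- initial invariant: path = [0], pos = {0 ↦ 0}
theorem inv_init (succ : PySem.Dict Int Int) : ChainInv succ [0] (PySem.Dict.empty.insert 0 0) := by
  refine ⟨by simp, by intro i hi; simp at hi, ?_, ?_⟩
  · intro c j hj
    rw [PySem.Dict.get?_insert] at hj
    by_cases hc : c = 0
    · simp [hc] at hj; exact ⟨0, by omega, by simp, by simp [hc]⟩
    · simp [hc, PySem.Dict.get?_empty] at hj
  · intro c hc
    rw [PySem.Dict.get?_insert] at hc
    by_cases h : c = 0
    · simp [h] at hc
    · simp [h]

-- ===== VERDICT (by name: the statement is the Claim_ definition above) =====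
theorem format_route_spec : Claim_equal_format_route := by
  intro route n _
  unfold Spec_format_route format_route format_route_alt
  split
  · rfl
  · exact (bLoop_eq_aLoop _ (n-1).toNat [0] _ 0 (inv_init _) (by simp)).symm
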